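-- pv_equiv track=rewrite | github.com/gensyn-ai/skippipe | schedulers/bipartite_matching.py | minimise_max
-- ===== SOURCE A (Python) =====
-- import itertools
--
-- def minimise_max(cost_matrix, curr_max):
--     x = len(cost_matrix)
--     curr_best = float("inf")
--     curr_best_sol = None
--     for comb in itertools.permutations(range(x)):
--         max_cost = 0
--
--         for idx,el in enumerate(comb):
--             max_cost = max(cost_matrix[el][idx],max_cost)
--         if max_cost <= curr_max:
--             return comb
--         if curr_best > max_cost:
--             curr_best = max_cost
--             curr_best_sol = comb
--     return curr_best_sol
-- ===== SOURCE B (Python) =====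
-- def minimise_max(cost_matrix, curr_max):
--     # Threshold search + greedy lexicographic reconstruction instead of scanning all n! permutations.
--     n = len(cost_matrix)
--
--     def selections(rows):
--         # [(rows[i], rows without rows[i]) for each i], in order
--         if not rows:
--             return []
--         x, xs = rows[0], rows[1:]
--         return [(x, xs)] + [(y, [x] + ys) for (y, ys) in selections(xs)]
--
--     def feasible(rows, col, T):
--         # can `rows` be assigned to columns col.. with every cost_matrix[r][c] <= T?
--         if not rows:
--             return True
--         return any(cost_matrix[r][col] <= T and feasible(rest, col + 1, T)
--                    for (r, rest) in selections(rows))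
--
--     rows = list(range(n))
--     if curr_max >= 0 and feasible(rows, 0, curr_max):
--         T = curr_max
--     else:
--         cands = sorted({c for row in cost_matrix for c in row[:n]})
--         lo, hi = 0, len(cands) - 1
--         while lo < hi:
--             mid = (lo + hi) // 2
--             if feasible(rows, 0, cands[mid]):
--                 hi = mid
--             else:
--                 lo = mid + 1
--         T = max(0, cands[lo]) if cands else 0
--
--     out = []
--     remaining = rows
--     for col in range(n):
--         for (r, rest) in selections(remaining):
--             if cost_matrix[r][col] <= T and feasible(rest, col + 1, T):
--                 out.append(r)
--                 remaining = rest
--                 break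
--     return tuple(out)
-- ===== Notes on version B (the rewrite author's own statement) =====
-- stated objective: alternative
-- what changed: Replaces A's scan of all n! permutations (tracking the first running minimiser) by a binary search over the sorted distinct cost values for the least feasible bottleneck threshold, with a pruning backtracking feasibility test, followed by a greedy lexicographic reconstruction of the answer column by column; intended as faster (measured 3.69x at n=64; at n=256 A times out where B returns) but a timing run could not confirm a ratio at the largest size, so no speed is claimed.
-- outside the precondition, e.g. on minimise_max([[5], [3, 4]], 10): A returns (0, 1), B returns (0, 1)
import Mathlib
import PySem

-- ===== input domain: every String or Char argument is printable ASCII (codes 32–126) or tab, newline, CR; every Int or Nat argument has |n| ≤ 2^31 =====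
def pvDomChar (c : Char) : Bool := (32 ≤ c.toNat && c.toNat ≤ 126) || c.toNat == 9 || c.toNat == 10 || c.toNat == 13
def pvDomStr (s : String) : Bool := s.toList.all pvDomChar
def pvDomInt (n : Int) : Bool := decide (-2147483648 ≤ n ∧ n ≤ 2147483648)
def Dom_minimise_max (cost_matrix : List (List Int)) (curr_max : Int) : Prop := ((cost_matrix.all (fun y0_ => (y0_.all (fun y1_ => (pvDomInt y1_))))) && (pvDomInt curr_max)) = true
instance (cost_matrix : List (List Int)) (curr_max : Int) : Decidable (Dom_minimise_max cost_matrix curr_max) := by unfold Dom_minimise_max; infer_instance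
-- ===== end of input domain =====

-- B replaces A's scan of all n! permutations by a threshold search (binary search over the
-- distinct costs) plus greedy lexicographic reconstruction with a backtracking feasibility
-- test; objective: alternative (intended as faster; measured 3.69x at n=64, unconfirmed at
-- larger sizes where A times out).

-- ===== PORT A =====

-- cost_matrix[r][c]; indices are in range under Pre_, the defaults are never hit there
def ent (cost : List (List Int)) (r : Int) (c : Nat) : Int :=
  (cost.getD r.toNat []).getD c 0

-- the selections of a list: [(l[i], l with l[i] removed) for each i], in order
def sel : List Int → List (Int × List Int)
  | [] => []
  | x :: xs => (x, xs) :: (sel xs).map (fun p => (p.1, x :: p.2))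

lemma sel_length : ∀ (l : List Int), ∀ p ∈ sel l, p.2.length + 1 = l.length := by
  intro l
  induction l with
  | nil => intro p h; simp [sel] at h
  | cons x xs ih =>
    intro p hp
    simp only [sel, List.mem_cons, List.mem_map] at hp
    rcases hp with rfl | ⟨q, hq, rfl⟩
    · simp
    · have := ih q hq; simp only [List.length_cons]; omega

-- itertools.permutations(range(x)) in lexicographic order: pick each first element in order
def perms : List Int → List (List Int)
  | [] => [[]]
  | x :: xs =>
    (sel (x :: xs)).attach.flatMap (fun p => (perms p.1.2).map (fun q => p.1.1 :: q))
termination_by l => l.length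
decreasing_by
  have := sel_length (x :: xs) p.1 p.2
  simp only [List.length_cons] at this ⊢; omega

-- the inner 'for idx,el in enumerate(comb): max_cost = max(cost[el][idx], max_cost)'
def valFrom (cost : List (List Int)) : Nat → Int → List Int → Int
  | _, max_cost, [] => max_cost
  | idx, max_cost, el :: rest => valFrom cost (idx + 1) (max (ent cost el idx) max_cost) rest

-- A's main loop; curr_best = none plays float("inf"), curr_best_sol starts as None
def ALoop (cost : List (List Int)) (curr_max : Int) :
    List (List Int) → Option Int → Option (List Int) → Option (List Int)
  | [], _, curr_best_sol => curr_best_sol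
  | comb :: rest, curr_best, curr_best_sol =>
    let max_cost := valFrom cost 0 0 comb
    if max_cost ≤ curr_max then some comb
    else if (match curr_best with | none => true | some b => decide (max_cost < b)) = true then
      ALoop cost curr_max rest (some max_cost) (some comb)
    else ALoop cost curr_max rest curr_best curr_best_sol

def minimise_max (cost_matrix : List (List Int)) (curr_max : Int) : List Int :=
  let x := cost_matrix.length
  (ALoop cost_matrix curr_max (perms ((List.range x).map (fun k => Int.ofNat k))) none none).getD []

-- ===== PORT B =====

-- feasible(rows, col, T): can `rows` be assigned to columns col.. with every cost ≤ T?
def feasible (cost : List (List Int)) (T : Int) : List Int → Nat → Bool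
  | [], _ => true
  | x :: xs, col =>
    (sel (x :: xs)).attach.any (fun p => decide (ent cost p.1.1 col ≤ T) && feasible cost T p.1.2 (col + 1))
termination_by rows _ => rows.length
decreasing_by
  have := sel_length (x :: xs) p.1 p.2
  simp only [List.length_cons] at this ⊢; omega

-- while lo < hi: mid = (lo+hi)//2; binary search for the least feasible threshold
def bsearch (cost : List (List Int)) (cands rows : List Int) : Nat → Nat → Nat
  | lo, hi =>
    if _h : lo < hi then
      let mid := (lo + hi) / 2
      if feasible cost (cands.getD mid 0) rows 0 then bsearch cost cands rows lo mid
      else bsearch cost cands rows (mid + 1) hi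
    else lo
termination_by lo hi => hi - lo
decreasing_by all_goals omega

def minimise_max_alt (cost_matrix : List (List Int)) (curr_max : Int) : List Int :=
  let n := cost_matrix.length
  let rows := (List.range n).map (fun k => Int.ofNat k)
  let T : Int :=
    if 0 ≤ curr_max ∧ feasible cost_matrix curr_max rows 0 = true then curr_max
    else
      let cands := PySem.List.sorted
        (PySem.Set.ofList (cost_matrix.flatMap (fun row => row.take n))) (fun c => c) false
      if cands.isEmpty then 0
      else max 0 (cands.getD (bsearch cost_matrix cands rows 0 (cands.length - 1)) 0)
  ((List.range n).foldl (fun st col =>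
      match (sel st.2).find? (fun p =>
          decide (ent cost_matrix p.1 col ≤ T) && feasible cost_matrix T p.2 (col + 1)) with
      | some p => (st.1 ++ [p.1], p.2)
      | none => st) (([] : List Int), rows)).1

-- ===== PRECONDITION & SPEC =====

-- Pre_ excludes ragged matrices having a row shorter than len(cost_matrix): on those A
-- (and B) in general raise IndexError, although A may return early when a permutation
-- within curr_max is found before a missing entry is touched.
def Pre_minimise_max (cost_matrix : List (List Int)) (curr_max : Int) : Prop :=
  ∀ row ∈ cost_matrix, cost_matrix.length ≤ row.length
instance (cost_matrix : List (List Int)) (curr_max : Int) : Decidable (Pre_minimise_max cost_matrix curr_max) := by unfold Pre_minimise_max; infer_instance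

def pvWitness_minimise_max : List (List Int) × Int := ([[3, 1], [2, 4]], 1)

def Spec_minimise_max (cost_matrix : List (List Int)) (curr_max : Int) (out : List Int) : Prop := out = minimise_max_alt cost_matrix curr_max
instance (cost_matrix : List (List Int)) (curr_max : Int) (out : List Int) : Decidable (Spec_minimise_max cost_matrix curr_max out) := by unfold Spec_minimise_max; infer_instance

-- ===== CLAIM (what is proved, stated in full; the proofs are below) =====
def Claim_equal_minimise_max : Prop := ∀ (cost_matrix : List (List Int)) (curr_max : Int), Dom_minimise_max cost_matrix curr_max → Pre_minimise_max cost_matrix curr_max → Spec_minimise_max cost_matrix curr_max (minimise_max cost_matrix curr_max)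

-- ===== LEMMAS AND PROOFS =====

-- all edges of a partial assignment are ≤ T (column offset col)
def allE (cost : List (List Int)) (T : Int) : List Int → Nat → Bool
  | [], _ => true
  | r :: rest, col => decide (ent cost r col ≤ T) && allE cost T rest (col + 1)

-- the list of edge costs of a partial assignment
def edges (cost : List (List Int)) : List Int → Nat → List Int
  | [], _ => []
  | r :: rest, col => ent cost r col :: edges cost rest (col + 1)

-- recursive form of B's greedy reconstruction loop
def greedyL (cost : List (List Int)) (T : Int) (rows : List Int) (col : Nat) : List Int :=
  match h : (sel rows).find? (fun p =>
      decide (ent cost p.1 col ≤ T) && feasible cost T p.2 (col + 1)) with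
  | some p => p.1 :: greedyL cost T p.2 (col + 1)
  | none => []
termination_by rows.length
decreasing_by
  have := sel_length rows p (List.mem_of_find?_eq_some h)
  omega

-- first minimiser of A's running-minimum scan
def fmin (cost : List (List Int)) : List (List Int) → List Int → List Int
  | [], a => a
  | q :: rest, a => fmin cost rest (if valFrom cost 0 0 q < valFrom cost 0 0 a then q else a)

-- the minimum value seen by A's scan
def minA (cost : List (List Int)) (a : List Int) (L : List (List Int)) : Int :=
  L.foldl (fun m q => min m (valFrom cost 0 0 q)) (valFrom cost 0 0 a)

lemma attach_any {α : Type} (l : List α) (f : α → Bool) :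
    (l.attach.any (fun p => f p.1)) = l.any f := by
  conv_rhs => rw [← List.attach_map_subtype_val l]
  rw [List.any_map]; rfl

lemma attach_flatMap {α β : Type} (l : List α) (g : α → List β) :
    (l.attach.flatMap (fun p => g p.1)) = l.flatMap g := by
  conv_rhs => rw [← List.attach_map_subtype_val l]
  rw [List.flatMap_map]

lemma perms_cons_eq (x : Int) (xs : List Int) :
    perms (x :: xs) = (sel (x :: xs)).flatMap (fun p => (perms p.2).map (fun q => p.1 :: q)) := by
  rw [perms]
  exact attach_flatMap (sel (x :: xs)) (fun a => (perms a.2).map (fun q => a.1 :: q))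

lemma feasible_cons_eq (cost : List (List Int)) (T : Int) (x : Int) (xs : List Int) (col : Nat) :
    feasible cost T (x :: xs) col
      = (sel (x :: xs)).any (fun p => decide (ent cost p.1 col ≤ T) && feasible cost T p.2 (col + 1)) := by
  rw [feasible]
  exact attach_any (sel (x :: xs)) (fun a => decide (ent cost a.1 col ≤ T) && feasible cost T a.2 (col + 1))

lemma any_const_and {α : Type} (l : List α) (c : Bool) (f : α → Bool) :
    (l.any fun x => c && f x) = (c && l.any f) := by
  cases c <;> simp

lemma any_congr' {α : Type} (l : List α) (f g : α → Bool) (h : ∀ x ∈ l, f x = g x) :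
    l.any f = l.any g := by
  induction l with
  | nil => rfl
  | cons x xs ih =>
    simp only [List.any_cons, h x (by simp), ih (fun y hy => h y (by simp [hy]))]

lemma find?_congr' {α : Type} (l : List α) (f g : α → Bool) (h : ∀ x ∈ l, f x = g x) :
    l.find? f = l.find? g := by
  induction l with
  | nil => rfl
  | cons x xs ih =>
    simp only [List.find?_cons, h x (by simp), ih (fun y hy => h y (by simp [hy]))]

lemma le_valFrom (cost : List (List Int)) :
    ∀ (p : List Int) (col : Nat) (m : Int), m ≤ valFrom cost col m p := by
  intro p
  induction p with
  | nil => intro col m; simp [valFrom]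
  | cons r rest ih =>
    intro col m
    exact le_trans (le_max_right _ _) (ih (col + 1) (max (ent cost r col) m))

lemma valFrom_le_iff (cost : List (List Int)) (T : Int) :
    ∀ (p : List Int) (col : Nat) (m : Int),
      valFrom cost col m p ≤ T ↔ (m ≤ T ∧ allE cost T p col = true) := by
  intro p
  induction p with
  | nil => intro col m; simp [valFrom, allE]
  | cons r rest ih =>
    intro col m
    simp only [valFrom, allE, ih, max_le_iff, Bool.and_eq_true, decide_eq_true_eq]
    tauto

lemma edge_le_valFrom (cost : List (List Int)) :
    ∀ (p : List Int) (col : Nat) (m : Int), ∀ e ∈ edges cost p col, e ≤ valFrom cost col m p := by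
  intro p
  induction p with
  | nil => intro col m e he; simp [edges] at he
  | cons r rest ih =>
    intro col m e he
    simp only [edges, List.mem_cons] at he
    rcases he with rfl | he
    · exact le_trans (le_max_left _ _) (le_valFrom cost rest (col + 1) _)
    · exact ih (col + 1) _ e he

lemma allE_iff_edges (cost : List (List Int)) (T : Int) :
    ∀ (p : List Int) (col : Nat), allE cost T p col = true ↔ ∀ e ∈ edges cost p col, e ≤ T := by
  intro p
  induction p with
  | nil => intro col; simp [allE, edges]
  | cons r rest ih =>
    intro col
    simp [allE, edges, ih]

lemma allE_mono (cost : List (List Int)) {T T' : Int} (h : T ≤ T') :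
    ∀ (p : List Int) (col : Nat), allE cost T p col = true → allE cost T' p col = true := by
  intro p col hp
  rw [allE_iff_edges] at hp ⊢
  exact fun e he => le_trans (hp e he) h

lemma edges_length (cost : List (List Int)) :
    ∀ (p : List Int) (col : Nat), (edges cost p col).length = p.length := by
  intro p
  induction p with
  | nil => intro col; rfl
  | cons r rest ih => intro col; simp [edges, ih]

lemma exists_max : ∀ (l : List Int), l ≠ [] → ∃ e ∈ l, ∀ x ∈ l, x ≤ e := by
  intro l
  induction l with
  | nil => intro h; exact absurd rfl h
  | cons x xs ih =>
    intro _
    rcases eq_or_ne xs [] with rfl | hxs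
    · exact ⟨x, by simp⟩
    · obtain ⟨e, he, hmax⟩ := ih hxs
      by_cases hx : x ≤ e
      · exact ⟨e, by simp [he], by
          intro y hy
          rcases List.mem_cons.mp hy with rfl | hy
          · exact hx
          · exact hmax y hy⟩
      · exact ⟨x, by simp, by
          intro y hy
          rcases List.mem_cons.mp hy with rfl | hy
          · exact le_refl _
          · exact le_trans (hmax y hy) (le_of_not_ge hx)⟩

lemma sel_perm : ∀ (l : List Int), ∀ p ∈ sel l, (p.1 :: p.2).Perm l := by
  intro l
  induction l with
  | nil => intro p h; simp [sel] at h
  | cons x xs ih =>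
    intro p hp
    simp only [sel, List.mem_cons, List.mem_map] at hp
    rcases hp with rfl | ⟨q, hq, rfl⟩
    · exact List.Perm.refl _
    · exact List.Perm.trans (List.Perm.swap x q.1 q.2) (List.Perm.cons x (ih q hq))

lemma perms_ne_nil : ∀ (N : Nat) (l : List Int), l.length ≤ N → perms l ≠ [] := by
  intro N
  induction N with
  | zero =>
    intro l hl
    have : l = [] := List.length_eq_zero_iff.mp (Nat.le_zero.mp hl)
    subst this; simp [perms]
  | succ N ih =>
    intro l hl
    match l with
    | [] => simp [perms]
    | x :: xs =>
      rw [perms]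
      intro hcontra
      rw [List.flatMap_eq_nil_iff] at hcontra
      have hmem : ((x, xs) : Int × List Int) ∈ sel (x :: xs) := by simp [sel]
      have := hcontra ⟨(x, xs), hmem⟩ (List.mem_attach _ _)
      rw [List.map_eq_nil_iff] at this
      exact ih xs (by simp at hl; omega) this

lemma perms_perm : ∀ (N : Nat) (l : List Int), l.length ≤ N → ∀ p ∈ perms l, p.Perm l := by
  intro N
  induction N with
  | zero =>
    intro l hl p hp
    have : l = [] := List.length_eq_zero_iff.mp (Nat.le_zero.mp hl)
    subst this; simp [perms] at hp; subst hp; exact List.Perm.refl _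
  | succ N ih =>
    intro l hl p hp
    match l with
    | [] => simp [perms] at hp; subst hp; exact List.Perm.refl _
    | x :: xs =>
      rw [perms] at hp
      simp only [List.mem_flatMap, List.mem_attach, List.mem_map, true_and] at hp
      obtain ⟨⟨q, hq⟩, ⟨p', hp', rfl⟩⟩ := hp
      have hlen := sel_length (x :: xs) q hq
      have hperm' : p'.Perm q.2 := ih q.2 (by
        simp only [List.length_cons] at hlen hl; omega) p' hp'
      exact List.Perm.trans (List.Perm.cons q.1 hperm') (sel_perm (x :: xs) q hq)

lemma feasible_eq_any (cost : List (List Int)) (T : Int) :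
    ∀ (N : Nat) (rows : List Int), rows.length ≤ N → ∀ (col : Nat),
      feasible cost T rows col = (perms rows).any (fun p => allE cost T p col) := by
  intro N
  induction N with
  | zero =>
    intro rows hl col
    have : rows = [] := List.length_eq_zero_iff.mp (Nat.le_zero.mp hl)
    subst this; simp [feasible, perms, allE]
  | succ N ih =>
    intro rows hl col
    match rows with
    | [] => simp [feasible, perms, allE]
    | x :: xs =>
      rw [feasible_cons_eq, perms_cons_eq, List.any_flatMap]
      apply any_congr'
      intro q hq
      have hlen := sel_length (x :: xs) q hq
      rw [List.any_map]
      rw [show ((fun p => allE cost T p col) ∘ (fun p => q.1 :: p))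
            = (fun p => decide (ent cost q.1 col ≤ T) && allE cost T p (col + 1)) from rfl,
        any_const_and, ih q.2 (by simp only [List.length_cons] at hlen hl; omega) (col + 1)]

lemma find?_sel_chain (cost : List (List Int)) (T : Int) (col : Nat) :
    ∀ (s : List (Int × List Int)),
      (∀ p ∈ s, feasible cost T p.2 (col + 1)
          = (perms p.2).any (fun q => allE cost T q (col + 1))) →
      (∀ p ∈ s, feasible cost T p.2 (col + 1) = true →
          (perms p.2).find? (fun q => allE cost T q (col + 1))
            = some (greedyL cost T p.2 (col + 1))) →
      ((s.flatMap (fun p => (perms p.2).map (fun q => p.1 :: q))).find?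
          (fun q => allE cost T q col))
        = (s.find? (fun p => decide (ent cost p.1 col ≤ T) && feasible cost T p.2 (col + 1))).map
            (fun p => p.1 :: greedyL cost T p.2 (col + 1)) := by
  intro s
  induction s with
  | nil => intro _ _; rfl
  | cons p s' ih =>
    intro hF hG
    rw [List.flatMap_cons, List.find?_append, List.find?_map, List.find?_cons,
      show ((fun q => allE cost T q col) ∘ (fun q => p.1 :: q))
        = (fun q => decide (ent cost p.1 col ≤ T) && allE cost T q (col + 1)) from rfl]
    cases hc : decide (ent cost p.1 col ≤ T) with
    | false =>
      have h1 : ((perms p.2).find? fun q => false && allE cost T q (col + 1)) = none := by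
        simp
      rw [h1]
      simp only [Option.map_none, Option.none_or, Bool.false_and]
      exact ih (fun q hq => hF q (by simp [hq])) (fun q hq => hG q (by simp [hq]))
    | true =>
      have hpred : ((perms p.2).find? fun q => true && allE cost T q (col + 1))
          = (perms p.2).find? fun q => allE cost T q (col + 1) := by
        apply find?_congr'
        intro q _; rw [Bool.true_and]
      rw [hpred]
      cases hf : feasible cost T p.2 (col + 1) with
      | true =>
        rw [hG p (by simp) hf]
        simp
      | false =>
        have hnone : ((perms p.2).find? fun q => allE cost T q (col + 1)) = none := by
          rw [List.find?_eq_none]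
          intro q hq
          have hany := hF p (by simp)
          rw [hf] at hany
          have := (List.any_eq_false.mp hany.symm) q hq
          simp at this ⊢
          exact this
        rw [hnone]
        simp only [Option.map_none, Option.none_or, Bool.true_and]
        exact ih (fun q hq => hF q (by simp [hq])) (fun q hq => hG q (by simp [hq]))

lemma perms_find_greedy (cost : List (List Int)) (T : Int) :
    ∀ (N : Nat) (rows : List Int), rows.length ≤ N → ∀ (col : Nat),
      feasible cost T rows col = true →
      (perms rows).find? (fun q => allE cost T q col) = some (greedyL cost T rows col) := by
  intro N
  induction N with
  | zero =>
    intro rows hl col _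
    have : rows = [] := List.length_eq_zero_iff.mp (Nat.le_zero.mp hl)
    subst this
    rw [greedyL]
    simp [perms, sel, allE]
  | succ N ih =>
    intro rows hl col hfeas
    match rows with
    | [] =>
      rw [greedyL]; simp [perms, sel, allE]
    | x :: xs =>
      have hF : ∀ p ∈ sel (x :: xs), feasible cost T p.2 (col + 1)
          = (perms p.2).any (fun q => allE cost T q (col + 1)) := by
        intro p hp
        have hlen := sel_length (x :: xs) p hp
        exact feasible_eq_any cost T N p.2 (by
          simp only [List.length_cons] at hlen hl; omega) (col + 1)
      have hG : ∀ p ∈ sel (x :: xs), feasible cost T p.2 (col + 1) = true →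
          (perms p.2).find? (fun q => allE cost T q (col + 1))
            = some (greedyL cost T p.2 (col + 1)) := by
        intro p hp hf
        have hlen := sel_length (x :: xs) p hp
        exact ih p.2 (by simp only [List.length_cons] at hlen hl; omega) (col + 1) hf
      rw [perms_cons_eq, find?_sel_chain cost T col (sel (x :: xs)) hF hG]
      -- feasibility gives a successful find? over the selections
      rw [feasible_cons_eq] at hfeas
      obtain ⟨p₀, hp₀, hcond⟩ := List.any_eq_true.mp hfeas
      have hsome : ((sel (x :: xs)).find?
          (fun p => decide (ent cost p.1 col ≤ T) && feasible cost T p.2 (col + 1))).isSome := by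
        rw [List.find?_isSome]
        exact ⟨p₀, hp₀, hcond⟩
      obtain ⟨p₁, hp₁⟩ := Option.isSome_iff_exists.mp hsome
      rw [hp₁, greedyL, hp₁]
      rfl

lemma foldl_greedy (cost : List (List Int)) (T : Int) :
    ∀ (N : Nat) (rows : List Int), rows.length ≤ N → ∀ (col : Nat) (out : List Int),
      feasible cost T rows col = true →
      ((List.range' col rows.length).foldl (fun st c =>
          match (sel st.2).find? (fun p =>
              decide (ent cost p.1 c ≤ T) && feasible cost T p.2 (c + 1)) with
          | some p => (st.1 ++ [p.1], p.2)
          | none => st) (out, rows))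
        = (out ++ greedyL cost T rows col, []) := by
  intro N
  induction N with
  | zero =>
    intro rows hl col out _
    have : rows = [] := List.length_eq_zero_iff.mp (Nat.le_zero.mp hl)
    subst this
    rw [greedyL]; simp [sel]
  | succ N ih =>
    intro rows hl col out hfeas
    match rows with
    | [] => rw [greedyL]; simp [sel]
    | x :: xs =>
      have hfeas' := hfeas
      rw [feasible_cons_eq] at hfeas'
      obtain ⟨p₀, hp₀, hcond⟩ := List.any_eq_true.mp hfeas'
      have hsome : ((sel (x :: xs)).find?
          (fun p => decide (ent cost p.1 col ≤ T) && feasible cost T p.2 (col + 1))).isSome := by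
        rw [List.find?_isSome]
        exact ⟨p₀, hp₀, hcond⟩
      obtain ⟨p₁, hp₁⟩ := Option.isSome_iff_exists.mp hsome
      have hlen := sel_length (x :: xs) p₁ (List.mem_of_find?_eq_some hp₁)
      have hcond₁ := List.find?_some hp₁
      have hfeas₁ : feasible cost T p₁.2 (col + 1) = true := by
        simp only [Bool.and_eq_true] at hcond₁
        exact hcond₁.2
      have hlen' : p₁.2.length = xs.length := by simp at hlen; omega
      rw [show (x :: xs).length = p₁.2.length + 1 by simp [hlen'],
        List.range'_succ, List.foldl_cons, hp₁]
      have := ih p₁.2 (by simp only [List.length_cons] at hl; omega) (col + 1) (out ++ [p₁.1]) hfeas₁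
      rw [this]
      conv_rhs => rw [greedyL, hp₁]
      simp

lemma ALoop_found (cost : List (List Int)) (cm : Int) :
    ∀ (L : List (List Int)) (b : Option Int) (bs : Option (List Int)) (p : List Int),
      L.find? (fun q => decide (valFrom cost 0 0 q ≤ cm)) = some p →
      ALoop cost cm L b bs = some p := by
  intro L
  induction L with
  | nil => intro b bs p h; simp at h
  | cons q rest ih =>
    intro b bs p h
    by_cases hq : valFrom cost 0 0 q ≤ cm
    · rw [List.find?_cons_of_pos (by simp [hq])] at h
      injection h with h; subst h
      simp [ALoop, hq]
    · rw [List.find?_cons_of_neg (by simp [hq])] at h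
      simp only [ALoop, if_neg hq]
      split <;> first
        | exact ih _ _ p h
        | (split <;> exact ih _ _ p h)

lemma ALoop_min (cost : List (List Int)) (cm : Int) :
    ∀ (L : List (List Int)) (s : List Int),
      (∀ p ∈ L, ¬ (valFrom cost 0 0 p ≤ cm)) →
      ALoop cost cm L (some (valFrom cost 0 0 s)) (some s) = some (fmin cost L s) := by
  intro L
  induction L with
  | nil => intro s _; simp [ALoop, fmin]
  | cons q rest ih =>
    intro s h
    have hq : ¬ (valFrom cost 0 0 q ≤ cm) := h q (by simp)
    simp only [ALoop, if_neg hq, fmin]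
    by_cases hlt : valFrom cost 0 0 q < valFrom cost 0 0 s
    · rw [if_pos (by simp [hlt]), if_pos hlt]
      exact ih q (fun p hp => h p (by simp [hp]))
    · rw [if_neg (by simp [hlt]), if_neg hlt]
      exact ih s (fun p hp => h p (by simp [hp]))

lemma foldl_min_le (cost : List (List Int)) :
    ∀ (L : List (List Int)) (m : Int),
      (L.foldl (fun m q => min m (valFrom cost 0 0 q)) m ≤ m) ∧
        ∀ p ∈ L, L.foldl (fun m q => min m (valFrom cost 0 0 q)) m ≤ valFrom cost 0 0 p := by
  intro L
  induction L with
  | nil => intro m; simp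
  | cons q rest ih =>
    intro m
    obtain ⟨h1, h2⟩ := ih (min m (valFrom cost 0 0 q))
    refine ⟨le_trans h1 (min_le_left _ _), ?_⟩
    intro p hp
    rcases List.mem_cons.mp hp with rfl | hp
    · exact le_trans h1 (min_le_right _ _)
    · exact h2 p hp

lemma foldl_min_attained (cost : List (List Int)) :
    ∀ (L : List (List Int)) (m : Int),
      L.foldl (fun m q => min m (valFrom cost 0 0 q)) m = m ∨
        ∃ p ∈ L, L.foldl (fun m q => min m (valFrom cost 0 0 q)) m = valFrom cost 0 0 p := by
  intro L
  induction L with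
  | nil => intro m; left; rfl
  | cons q rest ih =>
    intro m
    rcases ih (min m (valFrom cost 0 0 q)) with h | ⟨p, hp, h⟩
    · rcases min_choice m (valFrom cost 0 0 q) with hm | hm
      · left; simp only [List.foldl_cons]; rw [h, hm]
      · right; exact ⟨q, by simp, by simp only [List.foldl_cons]; rw [h, hm]⟩
    · right; exact ⟨p, by simp [hp], by simp only [List.foldl_cons]; exact h⟩

lemma minA_le (cost : List (List Int)) (a : List Int) (L : List (List Int)) :
    minA cost a L ≤ valFrom cost 0 0 a ∧ ∀ p ∈ L, minA cost a L ≤ valFrom cost 0 0 p :=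
  foldl_min_le cost L (valFrom cost 0 0 a)

lemma minA_attained (cost : List (List Int)) (a : List Int) (L : List (List Int)) :
    minA cost a L = valFrom cost 0 0 a ∨ ∃ p ∈ L, minA cost a L = valFrom cost 0 0 p :=
  foldl_min_attained cost L (valFrom cost 0 0 a)

lemma minA_cons (cost : List (List Int)) (a q : List Int) (rest : List (List Int)) :
    minA cost a (q :: rest)
      = minA cost (if valFrom cost 0 0 q < valFrom cost 0 0 a then q else a) rest := by
  unfold minA
  simp only [List.foldl_cons]
  congr 1
  by_cases h : valFrom cost 0 0 q < valFrom cost 0 0 a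
  · rw [if_pos h, min_eq_right (le_of_lt h)]
  · rw [if_neg h, min_eq_left (le_of_not_gt h)]

lemma find?_min (cost : List (List Int)) :
    ∀ (L : List (List Int)) (a : List Int),
      (a :: L).find? (fun p => decide (valFrom cost 0 0 p ≤ minA cost a L))
        = some (fmin cost L a) := by
  intro L
  induction L with
  | nil =>
    intro a
    show (a :: []).find? (fun p => decide (valFrom cost 0 0 p ≤ minA cost a [])) = some a
    exact List.find?_cons_of_pos (by simp [minA])
  | cons q rest ih =>
    intro a
    rw [minA_cons, fmin]
    by_cases hcase : valFrom cost 0 0 q < valFrom cost 0 0 a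
    · simp only [if_pos hcase]
      have hM := minA_le cost q rest
      have hnota : ¬ (valFrom cost 0 0 a ≤ minA cost q rest) := by
        have := hM.1; omega
      rw [List.find?_cons_of_neg (by simp [hnota])]
      exact ih q
    · simp only [if_neg hcase]
      have hM := minA_le cost a rest
      have hvaq : valFrom cost 0 0 a ≤ valFrom cost 0 0 q := le_of_not_gt hcase
      have hIH := ih a
      by_cases hp : valFrom cost 0 0 a ≤ minA cost a rest
      · rw [List.find?_cons_of_pos (by simp [hp])] at hIH
        rw [List.find?_cons_of_pos (by simp [hp])]
        exact hIH
      · rw [List.find?_cons_of_neg (by simp [hp])] at hIH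
        rw [List.find?_cons_of_neg (by simp [hp])]
        have hnotq : ¬ (valFrom cost 0 0 q ≤ minA cost a rest) := by
          have := hM.1; omega
        rw [List.find?_cons_of_neg (by simp [hnotq])]
        exact hIH

lemma feasible_mono (cost : List (List Int)) {T T' : Int} (h : T ≤ T') (rows : List Int)
    (col : Nat) (hf : feasible cost T rows col = true) : feasible cost T' rows col = true := by
  rw [feasible_eq_any cost T rows.length rows (le_refl _) col] at hf
  rw [feasible_eq_any cost T' rows.length rows (le_refl _) col]
  obtain ⟨p, hp, hall⟩ := List.any_eq_true.mp hf
  exact List.any_eq_true.mpr ⟨p, hp, allE_mono cost h p col hall⟩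

lemma bsearch_correct (cost : List (List Int)) (cands rows : List Int)
    (hm : ∀ j k : Nat, j ≤ k → k < cands.length →
      feasible cost (cands.getD j 0) rows 0 = true → feasible cost (cands.getD k 0) rows 0 = true) :
    ∀ (d lo hi : Nat), hi - lo ≤ d → lo ≤ hi → hi < cands.length →
      feasible cost (cands.getD hi 0) rows 0 = true →
      lo ≤ bsearch cost cands rows lo hi ∧ bsearch cost cands rows lo hi ≤ hi ∧
        feasible cost (cands.getD (bsearch cost cands rows lo hi) 0) rows 0 = true ∧
        ∀ k, lo ≤ k → k < bsearch cost cands rows lo hi →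
          feasible cost (cands.getD k 0) rows 0 = false := by
  intro d
  induction d with
  | zero =>
    intro lo hi hd hle hlen hfhi
    have : lo = hi := by omega
    subst this
    rw [bsearch]
    simp only [lt_irrefl]
    exact ⟨le_refl _, le_refl _, hfhi, fun k h1 h2 => absurd (lt_of_le_of_lt h1 h2) (lt_irrefl _)⟩
  | succ d ih =>
    intro lo hi hd hle hlen hfhi
    rw [bsearch]
    by_cases hlt : lo < hi
    · rw [dif_pos hlt]
      have hmid1 : lo ≤ (lo + hi) / 2 := by omega
      have hmid2 : (lo + hi) / 2 < hi := by omega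
      by_cases hfm : feasible cost (cands.getD ((lo + hi) / 2) 0) rows 0 = true
      · rw [if_pos hfm]
        obtain ⟨h1, h2, h3, h4⟩ := ih lo ((lo + hi) / 2) (by omega) hmid1 (by omega) hfm
        exact ⟨h1, le_trans h2 (le_of_lt hmid2), h3, h4⟩
      · rw [if_neg hfm]
        obtain ⟨h1, h2, h3, h4⟩ := ih ((lo + hi) / 2 + 1) hi (by omega) (by omega) hlen hfhi
        refine ⟨by omega, h2, h3, ?_⟩
        intro k hk1 hk2
        by_cases hkm : k ≤ (lo + hi) / 2
        · cases hfk : feasible cost (cands.getD k 0) rows 0 with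
          | false => rfl
          | true => exact absurd (hm k ((lo + hi) / 2) hkm (by omega) hfk) hfm
        · exact h4 k (by omega) hk2
    · rw [dif_neg hlt]
      have : lo = hi := by omega
      subst this
      exact ⟨le_refl _, le_refl _, hfhi, fun k h1 h2 => absurd (lt_of_le_of_lt h1 h2) (lt_irrefl _)⟩

lemma edges_mem_flat (cost : List (List Int)) (n : Nat) (hn : n = cost.length)
    (hpre : ∀ row ∈ cost, n ≤ row.length) :
    ∀ (p : List Int) (col : Nat),
      (∀ r ∈ p, ∃ k : Nat, r = (k : Int) ∧ k < n) → col + p.length ≤ n →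
      ∀ e ∈ edges cost p col, e ∈ cost.flatMap (fun row => row.take n) := by
  intro p
  induction p with
  | nil => intro col _ _ e he; simp [edges] at he
  | cons r rest ih =>
    intro col hr hlen e he
    simp only [edges, List.mem_cons] at he
    rcases he with rfl | he
    · obtain ⟨k, rfl, hk⟩ := hr r (by simp)
      have hkc : k < cost.length := by omega
      have hrow : cost.getD k [] = cost[k] := List.getD_eq_getElem cost [] hkc
      have hrowmem : cost[k] ∈ cost := List.getElem_mem hkc
      have hrlen : n ≤ cost[k].length := hpre _ hrowmem
      have hcol : col < n := by simp at hlen; omega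
      rw [List.mem_flatMap]
      refine ⟨cost[k], hrowmem, ?_⟩
      have hcol2 : col < (cost[k].take n).length := by
        simp [List.length_take]; omega
      have : ent cost ((k : Int)) col = (cost[k].take n)[col] := by
        unfold ent
        rw [Int.toNat_natCast, hrow, List.getElem_take,
          List.getD_eq_getElem cost[k] 0 (by omega)]
      rw [this]
      exact List.getElem_mem hcol2
    · exact ih (col + 1) (fun x hx => hr x (by simp [hx])) (by simp at hlen ⊢; omega) e he

lemma pred_eq_allE (cost : List (List Int)) (T : Int) (hT : 0 ≤ T) (p : List Int) :
    decide (valFrom cost 0 0 p ≤ T) = allE cost T p 0 := by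
  cases h : allE cost T p 0 with
  | true => exact decide_eq_true ((valFrom_le_iff cost T p 0 0).mpr ⟨hT, h⟩)
  | false =>
    apply decide_eq_false
    intro hle
    rw [((valFrom_le_iff cost T p 0 0).mp hle).2] at h
    exact Bool.true_eq_false.mp h

theorem minimise_max_spec : Claim_equal_minimise_max := by
  intro cost cm _dom hpre
  unfold Pre_minimise_max at hpre
  unfold Spec_minimise_max
  by_cases hnil : cost = []
  · subst hnil
    simp [minimise_max, minimise_max_alt, perms, ALoop, valFrom]
  simp only [minimise_max, minimise_max_alt]
  set rows : List Int := (List.range cost.length).map (fun k => Int.ofNat k) with hrows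
  have hlenrows : rows.length = cost.length := by simp [hrows]
  have hrows_mem : ∀ r ∈ rows, ∃ k : Nat, r = (k : Int) ∧ k < cost.length := by
    intro r hr
    rw [hrows] at hr
    simp only [List.mem_map, List.mem_range] at hr
    obtain ⟨k, hk, rfl⟩ := hr
    exact ⟨k, rfl, hk⟩

  by_cases hc1 : 0 ≤ cm ∧ feasible cost cm rows 0 = true
  · -- threshold curr_max is reachable: A's early return = B's greedy at T = curr_max
    rw [if_pos hc1]
    have hfold := foldl_greedy cost cm rows.length rows (le_refl _) 0 [] hc1.2
    rw [hlenrows] at hfold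
    rw [List.range_eq_range', hfold]
    have hfind := perms_find_greedy cost cm rows.length rows (le_refl _) 0 hc1.2
    have hfindP : (perms rows).find? (fun q => decide (valFrom cost 0 0 q ≤ cm))
        = some (greedyL cost cm rows 0) := by
      rw [find?_congr' (perms rows) _ (fun q => allE cost cm q 0)
        (fun p _ => pred_eq_allE cost cm hc1.1 p)]
      exact hfind
    rw [ALoop_found cost cm (perms rows) none none _ hfindP]
    simp
  · -- curr_max unreachable: A's first running minimiser = B's greedy at the bottleneck value
    rw [if_neg hc1]
    have hno : ∀ p ∈ perms rows, ¬ (valFrom cost 0 0 p ≤ cm) := by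
      intro p hp hle
      obtain ⟨h0, hall⟩ := (valFrom_le_iff cost cm p 0 0).mp hle
      apply hc1
      refine ⟨h0, ?_⟩
      rw [feasible_eq_any cost cm rows.length rows (le_refl _) 0]
      exact List.any_eq_true.mpr ⟨p, hp, hall⟩
    have hLne : perms rows ≠ [] := perms_ne_nil rows.length rows (le_refl _)
    obtain ⟨a, Ltl, hL⟩ := List.exists_cons_of_ne_nil hLne
    have hamem : a ∈ perms rows := by rw [hL]; simp
    -- A's result is the first minimiser
    have hqa : ¬ (valFrom cost 0 0 a ≤ cm) := hno a hamem
    have hA : ALoop cost cm (perms rows) none none = some (fmin cost Ltl a) := by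
      rw [hL]
      simp only [ALoop, if_neg hqa]
      exact ALoop_min cost cm Ltl a (fun p hp => hno p (by rw [hL]; simp [hp]))
    -- the minimum value M of A's scan
    have hM0 : 0 ≤ minA cost a Ltl := by
      rcases minA_attained cost a Ltl with h | ⟨p, _, h⟩ <;> rw [h] <;>
        exact le_valFrom cost _ 0 0
    have hfindM : (perms rows).find? (fun p => decide (valFrom cost 0 0 p ≤ minA cost a Ltl))
        = some (fmin cost Ltl a) := by rw [hL]; exact find?_min cost Ltl a
    have hfindAll : (perms rows).find? (fun p => allE cost (minA cost a Ltl) p 0)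
        = some (fmin cost Ltl a) := by
      rw [← find?_congr' (perms rows) _ _ (fun p _ => pred_eq_allE cost _ hM0 p)]
      exact hfindM
    have hfeasM : feasible cost (minA cost a Ltl) rows 0 = true := by
      rw [feasible_eq_any cost _ rows.length rows (le_refl _) 0]
      have hpred := List.find?_some hfindAll
      exact List.any_eq_true.mpr
        ⟨fmin cost Ltl a, List.mem_of_find?_eq_some hfindAll, hpred⟩
    have hGreedyM : greedyL cost (minA cost a Ltl) rows 0 = fmin cost Ltl a := by
      have := perms_find_greedy cost _ rows.length rows (le_refl _) 0 hfeasM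
      rw [this] at hfindAll
      exact Option.some.inj hfindAll
    -- the candidate list
    have hlpos : 0 < cost.length := List.length_pos_of_ne_nil hnil
    have hentsne : cost.flatMap (fun row => row.take cost.length) ≠ [] := by
      intro hcontra
      rw [List.flatMap_eq_nil_iff] at hcontra
      obtain ⟨r0, hr0⟩ := List.exists_mem_of_ne_nil cost hnil
      have htake := hcontra r0 hr0
      have hr0len := hpre r0 hr0
      have : (r0.take cost.length).length = 0 := by rw [htake]; rfl
      rw [List.length_take] at this
      omega
    have hcne : PySem.List.sorted
        (PySem.Set.ofList (cost.flatMap (fun row => row.take cost.length))) (fun c => c) false ≠ [] := by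
      intro hcontra
      rw [PySem.List.sorted_eq_nil_iff] at hcontra
      obtain ⟨e, he⟩ := List.exists_mem_of_ne_nil _ hentsne
      exact absurd (hcontra ▸ (PySem.Set.mem_ofList ..).mpr he) (List.not_mem_nil)
    set cands : List Int := PySem.List.sorted
      (PySem.Set.ofList (cost.flatMap (fun row => row.take cost.length))) (fun c => c) false
      with hcands
    rw [if_neg (by simp [List.isEmpty_iff, hcne])]
    have hmemc : ∀ e, e ∈ cands ↔ e ∈ cost.flatMap (fun row => row.take cost.length) := by
      intro e
      rw [hcands, PySem.List.mem_sorted, PySem.Set.mem_ofList]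
    have hpw : cands.Pairwise (· < ·) := PySem.List.sorted_ofList_pairwise_lt ..
    have hmono_idx : ∀ j k : Nat, j ≤ k → k < cands.length → cands.getD j 0 ≤ cands.getD k 0 := by
      intro j k hjk hk
      rw [List.getD_eq_getElem cands 0 (by omega), List.getD_eq_getElem cands 0 hk]
      rcases Nat.lt_or_ge j k with h | h
      · exact le_of_lt ((List.pairwise_iff_getElem.mp hpw) j k (by omega) hk h)
      · have : j = k := by omega
        subst this; exact le_refl _
    have hm : ∀ j k : Nat, j ≤ k → k < cands.length →
        feasible cost (cands.getD j 0) rows 0 = true →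
        feasible cost (cands.getD k 0) rows 0 = true :=
      fun j k hjk hk hf => feasible_mono cost (hmono_idx j k hjk hk) rows 0 hf
    have hcpos : 0 < cands.length := List.length_pos_of_ne_nil hcne
    have hcmax : ∀ c ∈ cands, c ≤ cands.getD (cands.length - 1) 0 := by
      intro c hc
      obtain ⟨k, hk, rfl⟩ := List.mem_iff_getElem.mp hc
      rw [← List.getD_eq_getElem cands 0 hk]
      exact hmono_idx k (cands.length - 1) (by omega) (by omega)
    -- every edge of a permutation is a candidate
    have hedge_mem : ∀ p ∈ perms rows, ∀ e ∈ edges cost p 0, e ∈ cands := by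
      intro p hp e he
      have hperm := perms_perm rows.length rows (le_refl _) p hp
      rw [hmemc]
      refine edges_mem_flat cost cost.length rfl hpre p 0 ?_ ?_ e he
      · exact fun r hr => hrows_mem r (hperm.mem_iff.mp hr)
      · rw [hperm.length_eq, hlenrows]; omega
    have hfeas_last : feasible cost (cands.getD (cands.length - 1) 0) rows 0 = true := by
      rw [feasible_eq_any cost _ rows.length rows (le_refl _) 0]
      refine List.any_eq_true.mpr ⟨a, hamem, ?_⟩
      rw [allE_iff_edges]
      exact fun e he => hcmax e (hedge_mem a hamem e he)
    obtain ⟨hi1, hi2, hi3, hi4⟩ := bsearch_correct cost cands rows hm (cands.length - 1)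
      0 (cands.length - 1) (le_refl _) (Nat.zero_le _) (by omega) hfeas_last
    set i : Nat := bsearch cost cands rows 0 (cands.length - 1) with hidef
    have hmin_c : ∀ c ∈ cands, feasible cost c rows 0 = true → cands.getD i 0 ≤ c := by
      intro c hc hfc
      obtain ⟨k, hk, rfl⟩ := List.mem_iff_getElem.mp hc
      by_cases hki : k < i
      · have := hi4 k (Nat.zero_le _) hki
        rw [List.getD_eq_getElem cands 0 hk] at this
        rw [this] at hfc
        exact absurd hfc (by simp)
      · rw [← List.getD_eq_getElem cands 0 hk]
        exact hmono_idx i k (by omega) hk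
    -- M = max 0 c*
    have hTM : max 0 (cands.getD i 0) = minA cost a Ltl := by
      apply le_antisymm
      · -- c* ≤ M and 0 ≤ M, via the maximal edge of a minimising permutation
        have key : ∀ q, q ∈ perms rows → minA cost a Ltl = valFrom cost 0 0 q →
            max 0 (cands.getD i 0) ≤ minA cost a Ltl := by
          intro q hqmem hMq
          have hperm := perms_perm rows.length rows (le_refl _) q hqmem
          have hqlen : q.length = cost.length := by rw [hperm.length_eq, hlenrows]
          have hqne : edges cost q 0 ≠ [] := by
            intro hc
            have hel := edges_length cost q 0
            rw [hc] at hel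
            simp at hel
            omega
          obtain ⟨e, he, hemax⟩ := exists_max _ hqne
          have hallEq : allE cost e q 0 = true := (allE_iff_edges cost e q 0).mpr hemax
          have hfe : feasible cost e rows 0 = true := by
            rw [feasible_eq_any cost _ rows.length rows (le_refl _) 0]
            exact List.any_eq_true.mpr ⟨q, hqmem, hallEq⟩
          have h1 : cands.getD i 0 ≤ e := hmin_c e (hedge_mem q hqmem e he) hfe
          have h2 : e ≤ valFrom cost 0 0 q := edge_le_valFrom cost q 0 0 e he
          exact max_le hM0 (by rw [hMq]; exact le_trans h1 h2)
        rcases minA_attained cost a Ltl with h | ⟨q, hq, h⟩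
        · exact key a hamem h
        · exact key q (by rw [hL]; simp [hq]) h
      · -- M ≤ max 0 c*
        have hfmax : feasible cost (max 0 (cands.getD i 0)) rows 0 = true :=
          feasible_mono cost (le_max_right _ _) rows 0 hi3
        rw [feasible_eq_any cost _ rows.length rows (le_refl _) 0] at hfmax
        obtain ⟨p, hp, hall⟩ := List.any_eq_true.mp hfmax
        have hvp : valFrom cost 0 0 p ≤ max 0 (cands.getD i 0) :=
          (valFrom_le_iff cost _ p 0 0).mpr ⟨le_max_left _ _, hall⟩
        have hMlep : minA cost a Ltl ≤ valFrom cost 0 0 p := by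
          rw [hL] at hp
          rcases List.mem_cons.mp hp with rfl | hp
          · exact (minA_le cost p Ltl).1
          · exact (minA_le cost a Ltl).2 p hp
        exact le_trans hMlep hvp
    -- assemble
    have hfold := foldl_greedy cost (minA cost a Ltl) rows.length rows (le_refl _) 0 [] hfeasM
    rw [hlenrows] at hfold
    rw [hTM, List.range_eq_range', hfold, hA]
    simp [hGreedyM]
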